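-- pv_equiv track=rewrite | github.com/ozy-7/Globe-Radio-Backend | search_utils.py | extract_location_keywords
-- ===== SOURCE A (Python) =====
-- def extract_location_keywords(query, stations):
--     query_words = query.lower().split()
--     locations = set()
--     for kw in query_words:
--         for s in stations:
--             city = s.get("city", "").lower()
--             country = s.get("country", "").lower()
--             if kw == city or kw == country:
--                 locations.add(kw)
--     return locations
-- ===== SOURCE B (Python) =====
-- def extract_location_keywords(query, stations):
--     locations = {v for s in stations
--                  for v in (s.get("city", "").lower(), s.get("country", "").lower())}
--     return set(query.lower().split()) & locations
-- ===== Notes on version B (the rewrite author's own statement) =====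
-- stated objective: simpler
-- what changed: B builds a location set in one pass over stations and returns a single set intersection with the query words, instead of A's per-query-word rescan of all stations with conditional set insertion.
import Mathlib
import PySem

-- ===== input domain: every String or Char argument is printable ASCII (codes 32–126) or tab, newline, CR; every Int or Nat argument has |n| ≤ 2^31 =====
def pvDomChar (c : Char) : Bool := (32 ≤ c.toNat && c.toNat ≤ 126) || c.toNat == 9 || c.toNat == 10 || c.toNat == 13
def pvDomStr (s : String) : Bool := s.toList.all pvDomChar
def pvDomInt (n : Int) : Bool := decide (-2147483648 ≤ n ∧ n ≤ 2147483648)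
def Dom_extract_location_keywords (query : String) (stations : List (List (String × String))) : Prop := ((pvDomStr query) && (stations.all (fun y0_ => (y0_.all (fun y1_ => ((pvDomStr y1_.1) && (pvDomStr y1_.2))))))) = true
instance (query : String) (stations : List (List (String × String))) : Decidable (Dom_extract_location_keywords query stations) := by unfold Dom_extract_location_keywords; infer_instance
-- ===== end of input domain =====

-- B builds the location set once and intersects it with the query-word set, replacing
-- A's per-query-word rescan of all stations; objective: simpler (same result, different traversal).

-- ===== PORT A =====
def extract_location_keywords (query : String) (stations : List (List (String × String))) : List String :=
  let query_words := PySem.Str.split₀ (PySem.Str.lower query)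
  query_words.foldl (fun locations kw =>
    stations.foldl (fun locations s =>
      let city := PySem.Str.lower (PySem.Dict.getD (PySem.Dict.ofList s) "city" "")
      let country := PySem.Str.lower (PySem.Dict.getD (PySem.Dict.ofList s) "country" "")
      if kw == city || kw == country then PySem.Set.add locations kw else locations)
      locations)
    PySem.Set.empty

-- ===== PORT B =====
def extract_location_keywords_alt (query : String) (stations : List (List (String × String))) : List String :=
  let locations : PySem.Set String := PySem.Set.ofList (stations.flatMap (fun s =>
    [PySem.Str.lower (PySem.Dict.getD (PySem.Dict.ofList s) "city" ""),
     PySem.Str.lower (PySem.Dict.getD (PySem.Dict.ofList s) "country" "")]))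
  PySem.Set.inter (PySem.Set.ofList (PySem.Str.split₀ (PySem.Str.lower query))) locations

-- ===== PRECONDITION & SPEC =====
def Spec_extract_location_keywords (query : String) (stations : List (List (String × String))) (out : List String) : Prop := out = extract_location_keywords_alt query stations
instance (query : String) (stations : List (List (String × String))) (out : List String) : Decidable (Spec_extract_location_keywords query stations out) := by unfold Spec_extract_location_keywords; infer_instance

-- ===== CLAIM (what is proved, stated in full; the proofs are below) =====
def Claim_equal_extract_location_keywords : Prop := ∀ (query : String) (stations : List (List (String × String))), Dom_extract_location_keywords query stations → Spec_extract_location_keywords query stations (extract_location_keywords query stations)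

-- ===== LEMMAS AND PROOFS =====

-- the station-match predicate both reshapings are reduced to
def pvMatch (stations : List (List (String × String))) (kw : String) : Bool :=
  stations.any (fun s => kw == PySem.Str.lower (PySem.Dict.getD (PySem.Dict.ofList s) "city" "")
                      || kw == PySem.Str.lower (PySem.Dict.getD (PySem.Dict.ofList s) "country" ""))

-- A's inner loop over stations adds kw exactly when some station matches it
lemma inner_loop_eq (stations : List (List (String × String))) (kw : String)
    (acc : PySem.Set String) :
    stations.foldl (fun locations s =>
      if kw == PySem.Str.lower (PySem.Dict.getD (PySem.Dict.ofList s) "city" "")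
         || kw == PySem.Str.lower (PySem.Dict.getD (PySem.Dict.ofList s) "country" "")
      then PySem.Set.add locations kw else locations) acc
    = if pvMatch stations kw then PySem.Set.add acc kw else acc := by
  induction stations generalizing acc with
  | nil => simp [pvMatch]
  | cons s ss ih =>
    simp only [List.foldl_cons, pvMatch, List.any_cons]
    by_cases h : (kw == PySem.Str.lower (PySem.Dict.getD (PySem.Dict.ofList s) "city" "")
         || kw == PySem.Str.lower (PySem.Dict.getD (PySem.Dict.ofList s) "country" "")) = true
    · rw [if_pos h, ih]
      have hmem : kw ∈ PySem.Set.add acc kw := by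
        rw [PySem.Set.mem_add]; exact Or.inr rfl
      simp [h, pvMatch]
    · rw [if_neg h, ih]
      simp only [pvMatch, Bool.eq_false_iff.mpr h, Bool.false_or]
      rfl

-- set(...) commutes with filter: dedup of a filtered list = filter of the dedup
lemma ofList_filter (q : String → Bool) (xs : List String) :
    PySem.Set.ofList (xs.filter q) = (PySem.Set.ofList xs).filter q := by
  induction xs using List.reverseRecOn with
  | nil => rfl
  | append_singleton xs x ih =>
    rw [List.filter_append, PySem.Set.ofList_append_singleton]
    by_cases hq : q x = true
    · simp only [List.filter_singleton, hq, cond_true]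
      rw [PySem.Set.ofList_append_singleton, ih]
      by_cases hm : x ∈ PySem.Set.ofList xs
      · rw [PySem.Set.add_of_mem hm, PySem.Set.add_of_mem (by
          rw [List.mem_filter]; exact ⟨hm, hq⟩)]
      · rw [PySem.Set.add_of_not_mem hm, PySem.Set.add_of_not_mem (by
          rw [List.mem_filter]; exact fun h => hm h.1), List.filter_append,
          List.filter_singleton]
        simp [hq]
    · simp only [List.filter_singleton, Bool.eq_false_iff.mpr hq, cond_false, List.append_nil]
      rw [ih]
      by_cases hm : x ∈ PySem.Set.ofList xs
      · rw [PySem.Set.add_of_mem hm]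
      · rw [PySem.Set.add_of_not_mem hm, List.filter_append, List.filter_singleton]
        simp [hq]

-- membership in B's location index coincides with A's per-station match test
lemma contains_locations (stations : List (List (String × String))) (kw : String) :
    PySem.Set.contains (PySem.Set.ofList (stations.flatMap (fun s =>
      [PySem.Str.lower (PySem.Dict.getD (PySem.Dict.ofList s) "city" ""),
       PySem.Str.lower (PySem.Dict.getD (PySem.Dict.ofList s) "country" "")]))) kw
    = pvMatch stations kw := by
  rw [Bool.eq_iff_iff, PySem.Set.contains_iff, PySem.Set.mem_ofList, List.mem_flatMap, pvMatch,
    List.any_eq_true]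
  constructor
  · rintro ⟨s, hs, hmem⟩
    refine ⟨s, hs, ?_⟩
    simp only [List.mem_cons, List.not_mem_nil, or_false] at hmem
    rcases hmem with h | h <;> simp [h]
  · rintro ⟨s, hs, h⟩
    refine ⟨s, hs, ?_⟩
    rcases Bool.or_eq_true_iff.mp h with h' | h' <;> simp [eq_of_beq h']

-- ===== VERDICT (by name: the statement is the Claim_ definition above) =====
theorem extract_location_keywords_spec : Claim_equal_extract_location_keywords := by
  intro query stations _
  unfold Spec_extract_location_keywords extract_location_keywords extract_location_keywords_alt
  simp only
  have h1 : (PySem.Str.split₀ (PySem.Str.lower query)).foldl (fun locations kw =>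
        stations.foldl (fun locations s =>
          if kw == PySem.Str.lower (PySem.Dict.getD (PySem.Dict.ofList s) "city" "")
             || kw == PySem.Str.lower (PySem.Dict.getD (PySem.Dict.ofList s) "country" "")
          then PySem.Set.add locations kw else locations) locations) PySem.Set.empty
      = ((PySem.Str.split₀ (PySem.Str.lower query)).filter (pvMatch stations)).foldl
          PySem.Set.add PySem.Set.empty := by
    rw [List.foldl_filter]
    exact PySem.List.foldl_congr_mem _ _ _ _ (fun a b _ => inner_loop_eq stations b a)
  rw [h1]
  have h2 : ((PySem.Str.split₀ (PySem.Str.lower query)).filter (pvMatch stations)).foldl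
      PySem.Set.add PySem.Set.empty
      = PySem.Set.ofList ((PySem.Str.split₀ (PySem.Str.lower query)).filter (pvMatch stations)) := by
    rw [PySem.Set.ofList_eq_foldl]; rfl
  rw [h2, ofList_filter]
  show _ = List.filter _ _
  exact List.filter_congr (fun kw _ => (contains_locations stations kw).symm)
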